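-- pv_equiv track=rewrite | github.com/vrajeshtanaydas/Capstone | TreeTableMaker.py | branchFinder
-- ===== SOURCE A (Python) =====
-- def branchFinder(processedString):
--     branches = []
--     opens = []
--     bpos = 0
--
--     for i, char in enumerate(processedString):
--         if i == 0 or i == len(processedString) - 1:
--             continue
--         if char == '(':
--             opens.append(i)
--         elif char == ')':
--             branches.append([])
--             for letter in processedString[opens.pop()+1:i]:
--                 if letter in [',', '(', ')']:
--                     continue
--                 else:
--                     branches[bpos].append(letter)
--             bpos += 1
--         elif char == ',':
--             continue
--         else:
--             branches.append([char])
--             bpos += 1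
--     return branches
-- ===== SOURCE B (Python) =====
-- def branchFinder(processedString):
--     # Recursive-descent parse of the interior (first and last characters are
--     # always skipped): each '(' opens a recursive frame collecting its own
--     # branches and letters; on the matching ')' the frame's letters become one
--     # branch, so no substring is ever rescanned.
--     interior = processedString[1:-1]
--
--     def parse(pos):
--         branches = []
--         letters = []
--         while pos < len(interior):
--             c = interior[pos]
--             pos += 1
--             if c == '(':
--                 inner_branches, inner_letters, pos, closed = parse(pos)
--                 branches += inner_branches
--                 if closed:
--                     branches.append(inner_letters)
--                 letters += inner_letters
--             elif c == ')':
--                 return branches, letters, pos, True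
--             elif c != ',':
--                 branches.append([c])
--                 letters.append(c)
--         return branches, letters, pos, False
--
--     return parse(0)[0]
-- ===== Notes on version B (the rewrite author's own statement) =====
-- stated objective: alternative
-- what changed: A keeps a stack of '(' indices and re-scans the substring between the matched parentheses at every ')'; B strips the interior once and runs a recursive-descent parser whose frames accumulate their own branches and letters, so each group branch is the frame's letter list and no substring is rescanned.
import Mathlib
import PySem

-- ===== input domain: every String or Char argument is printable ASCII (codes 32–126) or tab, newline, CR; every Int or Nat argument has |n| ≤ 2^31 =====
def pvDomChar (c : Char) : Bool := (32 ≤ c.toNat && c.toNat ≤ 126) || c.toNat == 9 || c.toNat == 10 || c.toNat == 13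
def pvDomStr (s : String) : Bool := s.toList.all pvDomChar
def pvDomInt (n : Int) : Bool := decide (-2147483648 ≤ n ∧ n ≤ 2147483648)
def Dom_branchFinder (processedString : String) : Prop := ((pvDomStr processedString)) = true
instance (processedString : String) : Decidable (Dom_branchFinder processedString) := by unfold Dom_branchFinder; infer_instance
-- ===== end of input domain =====

-- B replaces A's index stack + per-')' rescan of the enclosed substring by a recursive-descent
-- parser over the stripped interior; equivalence is on the return value.

-- ===== PORT A =====
-- `for i, char in enumerate(processedString)` as structural recursion on the remaining
-- characters with the running index i; `opens.pop()` is getLast?/dropLast (the `none`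
-- case is Python's IndexError, excluded by Pre_ below).
def loopA (cs : List Char) (n : Nat) :
    List Char → Nat → List (List String) → List Nat → Nat → List (List String)
  | [], _, branches, _, _ => branches
  | c :: rest, i, branches, opens, bpos =>
    if i = 0 ∨ i = n - 1 then loopA cs n rest (i+1) branches opens bpos
    else if c = '(' then loopA cs n rest (i+1) branches (opens ++ [i]) bpos
    else if c = ')' then
      match opens.getLast? with
      | none => branches  -- Python raises IndexError here (outside Pre_)
      | some o =>
        let branch := (PySem.List.slice cs (some ((o : Int) + 1)) (some (i : Int))).foldl
          (fun acc letter =>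
            if letter = ',' ∨ letter = '(' ∨ letter = ')' then acc
            else acc ++ [String.ofList [letter]]) []
        loopA cs n rest (i+1) (branches ++ [branch]) opens.dropLast (bpos + 1)
    else if c = ',' then loopA cs n rest (i+1) branches opens bpos
    else loopA cs n rest (i+1) (branches ++ [[String.ofList [c]]]) opens (bpos + 1)

def branchFinder (processedString : String) : List (List String) :=
  loopA processedString.toList processedString.toList.length
    processedString.toList 0 [] [] 0

-- ===== PORT B =====
-- `parse` ported as structural recursion on the remaining characters (Python's `pos`
-- cursor) with a fuel counter as a pure totality guard (fuel = interior length suffices,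
-- each call site consumes at least one character); the returned `pos` becomes the
-- returned remainder list. Result = (branches, letters, remainder, closed).
def parseB : Nat → List Char → List (List String) → List String →
    List (List String) × List String × List Char × Bool
  | 0, rest, branches, letters => (branches, letters, rest, false)
  | _+1, [], branches, letters => (branches, letters, [], false)
  | fuel+1, c :: rest, branches, letters =>
    if c = '(' then
      let r := parseB fuel rest [] []
      parseB fuel r.2.2.1
        (branches ++ r.1 ++ (if r.2.2.2 then [r.2.1] else []))
        (letters ++ r.2.1)
    else if c = ')' then (branches, letters, rest, true)
    else if c ≠ ',' then
      parseB fuel rest (branches ++ [[String.ofList [c]]]) (letters ++ [String.ofList [c]])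
    else parseB fuel rest branches letters

def branchFinder_alt (processedString : String) : List (List String) :=
  let interior := (processedString.toList.drop 1).dropLast  -- s[1:-1]
  (parseB interior.length interior [] []).1

-- ===== PRECONDITION & SPEC =====
-- Pre_ excludes exactly the inputs where Python A's `opens.pop()` pops from an empty
-- list, an IndexError: some interior ')' has no matching interior '(' before it.
def Pre_branchFinder (processedString : String) : Prop :=
  ∀ k ≤ ((processedString.toList.drop 1).dropLast).length,
    (((processedString.toList.drop 1).dropLast).take k).count ')' ≤
    (((processedString.toList.drop 1).dropLast).take k).count '('
instance (processedString : String) : Decidable (Pre_branchFinder processedString) := by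
  unfold Pre_branchFinder; infer_instance
def pvWitness_branchFinder : String := "x(a,(b,c))y"

def Spec_branchFinder (processedString : String) (out : List (List String)) : Prop := out = branchFinder_alt processedString
instance (processedString : String) (out : List (List String)) : Decidable (Spec_branchFinder processedString out) := by unfold Spec_branchFinder; infer_instance

-- ===== CLAIM (what is proved, stated in full; the proofs are below) =====
def Claim_equal_branchFinder : Prop := ∀ (processedString : String), Dom_branchFinder processedString → Pre_branchFinder processedString → Spec_branchFinder processedString (branchFinder processedString)

-- ===== LEMMAS AND PROOFS =====

-- Proof-side stepping stone 1: A's loop re-expressed with a cumulative letter list and a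
-- stack of offsets into it (same index-skipping traversal as loopA).
def loopB (n : Nat) :
    List Char → Nat → List (List String) → List String → List Nat → List (List String)
  | [], _, branches, _, _ => branches
  | c :: rest, i, branches, letters, stack =>
    if i = 0 ∨ i = n - 1 then loopB n rest (i+1) branches letters stack
    else if c = '(' then loopB n rest (i+1) branches letters (stack ++ [letters.length])
    else if c = ')' then
      match stack.getLast? with
      | none => branches
      | some m => loopB n rest (i+1) (branches ++ [letters.drop m]) letters stack.dropLast
    else if c = ',' then loopB n rest (i+1) branches letters stack
    else loopB n rest (i+1) (branches ++ [[String.ofList [c]]]) (letters ++ [String.ofList [c]]) stack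

-- Proof-side stepping stone 2: the same machine on the bare interior, no indices.
def runI : List Char → List (List String) → List String → List Nat → List (List String)
  | [], branches, _, _ => branches
  | c :: rest, branches, letters, stack =>
    if c = '(' then runI rest branches letters (stack ++ [letters.length])
    else if c = ')' then
      match stack.getLast? with
      | none => branches
      | some m => runI rest (branches ++ [letters.drop m]) letters stack.dropLast
    else if c = ',' then runI rest branches letters stack
    else runI rest (branches ++ [[String.ofList [c]]]) (letters ++ [String.ofList [c]]) stack

-- letters of positions a..b-1 of cs, as single-char strings (commas/parens dropped)
def seg (cs : List Char) (a b : Nat) : List String :=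
  ((cs.take b).drop a).filterMap
    (fun c => if c = ',' ∨ c = '(' ∨ c = ')' then none else some (String.ofList [c]))

theorem seg_nil (cs : List Char) (a b : Nat) (h : b ≤ a) : seg cs a b = [] := by
  unfold seg
  rw [List.drop_eq_nil_of_le (by simp [List.length_take]; omega)]
  rfl

theorem seg_succ (cs : List Char) (a b : Nat) (hab : a ≤ b) (hb : b < cs.length) :
    seg cs a (b+1) = seg cs a b ++
      (if cs[b] = ',' ∨ cs[b] = '(' ∨ cs[b] = ')' then [] else [String.ofList [cs[b]]]) := by
  unfold seg
  rw [List.take_add_one, List.getElem?_eq_getElem hb,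
    List.drop_append_of_le_length (by simp [List.length_take]; omega),
    List.filterMap_append]
  by_cases h : cs[b] = ',' ∨ cs[b] = '(' ∨ cs[b] = ')' <;> simp [h, Option.toList]

theorem count_succ (cs : List Char) (b : Nat) (x : Char) (hb : b < cs.length) (h1 : 1 ≤ b) :
    ((cs.take (b+1)).drop 1).count x =
      ((cs.take b).drop 1).count x + (if cs[b] = x then 1 else 0) := by
  rw [List.take_add_one, List.getElem?_eq_getElem hb,
    List.drop_append_of_le_length (by simp [List.length_take]; omega)]
  by_cases h : cs[b] = x <;> simp [List.count_append, Option.toList, h]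

theorem foldl_branch (l : List Char) (acc : List String) :
    l.foldl (fun acc letter =>
      if letter = ',' ∨ letter = '(' ∨ letter = ')' then acc
      else acc ++ [String.ofList [letter]]) acc
    = acc ++ l.filterMap
        (fun c => if c = ',' ∨ c = '(' ∨ c = ')' then none else some (String.ofList [c])) := by
  induction l generalizing acc with
  | nil => simp
  | cons c t ih => by_cases h : c = ',' ∨ c = '(' ∨ c = ')' <;> simp [List.foldl, ih, h]

theorem zip_last_mem {α β : Type} (a : List α) (b : List β) (h : a.length = b.length)
    (ha : a ≠ []) (hb : b ≠ []) : (a.getLast ha, b.getLast hb) ∈ a.zip b := by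
  have h1 : a.zip b = a.dropLast.zip b.dropLast ++ [(a.getLast ha, b.getLast hb)] := by
    conv_lhs => rw [← List.dropLast_concat_getLast ha, ← List.dropLast_concat_getLast hb]
    rw [List.zip_append (by simp [List.length_dropLast, h])]
    rfl
  rw [h1]
  exact List.mem_append_right _ (List.mem_singleton.mpr rfl)

theorem zip_dropLast_mem {α β : Type} (a : List α) (b : List β) (h : a.length = b.length)
    (p : α × β) (hp : p ∈ a.dropLast.zip b.dropLast) : p ∈ a.zip b := by
  by_cases ha : a = []
  · subst ha; simp at hp
  · have hb : b ≠ [] := by intro hb0; subst hb0; simp at h; exact ha h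
    have h1 : a.zip b = a.dropLast.zip b.dropLast ++ [(a.getLast ha, b.getLast hb)] := by
      conv_lhs => rw [← List.dropLast_concat_getLast ha, ← List.dropLast_concat_getLast hb]
      rw [List.zip_append (by simp [List.length_dropLast, h])]
      rfl
    rw [h1]
    exact List.mem_append_left _ hp

theorem main_lemma (cs : List Char)
    (hpre : ∀ k ≤ ((cs.drop 1).dropLast).length,
      (((cs.drop 1).dropLast).take k).count ')' ≤ (((cs.drop 1).dropLast).take k).count '(') :
    ∀ (rest : List Char) (i : Nat), cs.drop i = rest →
    ∀ (branches : List (List String)) (letters : List String)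
      (opens stack : List Nat) (bpos : Nat),
      opens.length = stack.length →
      letters = seg cs 1 (min i (cs.length - 1)) →
      (∀ p ∈ opens.zip stack, p.1 < i ∧ p.2 ≤ letters.length ∧
        seg cs (p.1 + 1) (min i (cs.length - 1)) = letters.drop p.2) →
      ((cs.take (min i (cs.length - 1))).drop 1).count '(' =
        opens.length + ((cs.take (min i (cs.length - 1))).drop 1).count ')' →
      loopA cs cs.length rest i branches opens bpos =
        loopB cs.length rest i branches letters stack := by
  intro rest
  induction rest with
  | nil => intro i _ branches letters opens stack bpos _ _ _ _; rfl
  | cons c rest ih =>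
    intro i hdrop branches letters opens stack bpos hlen hlet hzip hcnt
    have hi : i < cs.length := by
      by_contra hge
      rw [List.drop_eq_nil_of_le (by omega)] at hdrop
      simp at hdrop
    have hci : cs[i] = c := by
      have h0 : cs[i]? = some c := by
        rw [show cs[i]? = (cs.drop i)[0]? by simp [List.getElem?_drop], hdrop]
        rfl
      exact (List.getElem_eq_iff hi).mpr h0
    have hrest : cs.drop (i+1) = rest := by
      have := congrArg (List.drop 1) hdrop
      simpa [List.drop_drop, Nat.add_comm] using this
    by_cases h0 : i = 0 ∨ i = cs.length - 1
    · simp only [loopA, loopB, if_pos h0]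
      rcases h0 with h0 | h0
      · -- i = 0: everything is still empty
        subst h0
        have hcs0 : (cs.take (min 0 (cs.length - 1))).drop 1 = ([] : List Char) := by simp
        rw [hcs0] at hcnt
        simp at hcnt
        have hop : opens = [] := List.eq_nil_of_length_eq_zero (by omega)
        have hst : stack = [] := List.eq_nil_of_length_eq_zero (by omega)
        have hlet0 : letters = [] := by
          rw [hlet, seg_nil cs 1 (min 0 (cs.length - 1)) (by omega)]
        apply ih 1 hrest branches letters opens stack bpos hlen
        · rw [hlet0, seg_nil cs 1 (min 1 (cs.length - 1)) (by omega)]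
        · subst hop hst; intro p hp; simp at hp
        · have hcs1 : (cs.take (min 1 (cs.length - 1))).drop 1 = ([] : List Char) :=
            List.drop_eq_nil_of_le (by simp only [List.length_take]; omega)
          rw [hcs1, hop]
          simp
      · -- i = length - 1: min (i+1) (length-1) = min i (length-1)
        have hmin : min (i+1) (cs.length - 1) = min i (cs.length - 1) := by omega
        exact ih (i+1) hrest branches letters opens stack bpos hlen
          (by rw [hmin]; exact hlet)
          (by intro p hp; obtain ⟨h1, h2, h3⟩ := hzip p hp; exact ⟨by omega, h2, by rw [hmin]; exact h3⟩)
          (by rw [hmin]; exact hcnt)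
    · rw [not_or] at h0
      obtain ⟨hne0, hneL⟩ := h0
      have hiL : i < cs.length - 1 := by omega
      have h1i : 1 ≤ i := by omega
      have hmin : min i (cs.length - 1) = i := by omega
      have hmin1 : min (i+1) (cs.length - 1) = i + 1 := by omega
      rw [hmin] at hlet hzip hcnt
      have hcond : ¬(i = 0 ∨ i = cs.length - 1) := by omega
      simp only [loopA, loopB, if_neg hcond]
      by_cases hc : c = '('
      · simp only [if_pos hc]
        apply ih (i+1) hrest _ letters (opens ++ [i]) (stack ++ [letters.length]) bpos
          (by simp [hlen])
        · rw [hmin1, seg_succ cs 1 i h1i hi, hci, hc]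
          simp [hlet]
        · intro p hp
          rw [List.zip_append hlen] at hp
          rcases List.mem_append.mp hp with hp | hp
          · obtain ⟨hp1, hp2, hp3⟩ := hzip p hp
            refine ⟨by omega, hp2, ?_⟩
            rw [hmin1, seg_succ cs (p.1+1) i (by omega) hi, hci, hc]
            simp [hp3]
          · rw [List.mem_singleton.mp hp]
            refine ⟨by omega, le_refl _, ?_⟩
            simp only [hmin1]
            rw [seg_nil cs (i+1) (i+1) (le_refl _), List.drop_length]
        · rw [hmin1, count_succ cs i '(' hi h1i, count_succ cs i ')' hi h1i, hci, hc]
          rw [if_pos rfl, if_neg (by decide)]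
          simp only [List.length_append, List.length_cons, List.length_nil]
          omega
      · simp only [if_neg hc]
        by_cases hc2 : c = ')'
        · simp only [if_pos hc2]
          -- opens is nonempty: Pre_ plus the count invariant
          have hk : 1 ≤ opens.length := by
            have hlen2 : ((cs.drop 1).dropLast).length = cs.length - 1 - 1 := by
              simp [List.length_dropLast]
            have hp := hpre i (by omega)
            have htake : ((cs.drop 1).dropLast).take i = (cs.take (i+1)).drop 1 := by
              rw [List.dropLast_eq_take, List.take_take, List.drop_take]
              congr 1
              simp only [List.length_drop]
              omega
            rw [htake] at hp
            rw [count_succ cs i ')' hi h1i, count_succ cs i '(' hi h1i, hci, hc2] at hp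
            rw [if_pos rfl, if_neg (by decide)] at hp
            omega
          have hop : opens ≠ [] := by intro h; subst h; simp at hk
          have hst : stack ≠ [] := by
            intro h; subst h; rw [List.length_nil] at hlen; omega
          rw [List.getLast?_eq_some_getLast hop, List.getLast?_eq_some_getLast hst]
          have hmem : (opens.getLast hop, stack.getLast hst) ∈ opens.zip stack :=
            zip_last_mem opens stack hlen hop hst
          obtain ⟨hplt, hple, hpseg⟩ := hzip _ hmem
          have hbr : (PySem.List.slice cs (some ((opens.getLast hop : Int) + 1)) (some (i : Int))).foldl
              (fun acc letter =>
                if letter = ',' ∨ letter = '(' ∨ letter = ')' then acc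
                else acc ++ [String.ofList [letter]]) []
              = letters.drop (stack.getLast hst) := by
            rw [show ((opens.getLast hop : Int) + 1) = ((opens.getLast hop + 1 : Nat) : Int) by push_cast; ring]
            rw [PySem.List.slice_natCast, foldl_branch, List.nil_append, ← List.drop_take]
            exact hpseg
          simp only [hbr]
          apply ih (i+1) hrest (branches ++ [letters.drop (stack.getLast hst)]) letters
            opens.dropLast stack.dropLast (bpos+1) (by simp [List.length_dropLast, hlen])
          · rw [hmin1, seg_succ cs 1 i h1i hi, hci, hc2]
            simp [hlet]
          · intro p hp
            obtain ⟨hp1, hp2, hp3⟩ := hzip p (zip_dropLast_mem opens stack hlen p hp)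
            refine ⟨by omega, hp2, ?_⟩
            rw [hmin1, seg_succ cs (p.1+1) i (by omega) hi, hci, hc2]
            simp [hp3]
          · rw [hmin1, count_succ cs i '(' hi h1i, count_succ cs i ')' hi h1i, hci, hc2]
            rw [if_neg (by decide), if_pos rfl]
            simp only [List.length_dropLast]
            omega
        · simp only [if_neg hc2]
          by_cases hc3 : c = ','
          · simp only [if_pos hc3]
            apply ih (i+1) hrest branches letters opens stack bpos hlen
            · rw [hmin1, seg_succ cs 1 i h1i hi, hci, hc3]
              simp [hlet]
            · intro p hp
              obtain ⟨hp1, hp2, hp3⟩ := hzip p hp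
              refine ⟨by omega, hp2, ?_⟩
              rw [hmin1, seg_succ cs (p.1+1) i (by omega) hi, hci, hc3]
              simp [hp3]
            · rw [hmin1, count_succ cs i '(' hi h1i, count_succ cs i ')' hi h1i, hci, hc3]
              rw [if_neg (by decide), if_neg (by decide)]
              omega
          · simp only [if_neg hc3]
            have hnc : ¬(c = ',' ∨ c = '(' ∨ c = ')') := by
              intro h; rcases h with h | h | h; exacts [hc3 h, hc h, hc2 h]
            apply ih (i+1) hrest _ (letters ++ [String.ofList [c]]) opens stack (bpos+1) hlen
            · rw [hmin1, seg_succ cs 1 i h1i hi, hci]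
              rw [if_neg hnc]
              rw [hlet]
            · intro p hp
              obtain ⟨hp1, hp2, hp3⟩ := hzip p hp
              refine ⟨by omega, by simp; omega, ?_⟩
              rw [hmin1, seg_succ cs (p.1+1) i (by omega) hi, hci]
              rw [if_neg hnc]
              rw [hp3, List.drop_append_of_le_length hp2]
            · rw [hmin1, count_succ cs i '(' hi h1i, count_succ cs i ')' hi h1i, hci]
              rw [if_neg hc, if_neg hc2]
              omega

-- loopB with the index skip = runI on the interior
theorem loopB_runI (n : Nat) :
    ∀ (rest : List Char) (i : Nat), 1 ≤ i → i + rest.length = n →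
    ∀ branches letters stack,
      loopB n rest i branches letters stack = runI rest.dropLast branches letters stack := by
  intro rest
  induction rest with
  | nil => intro i _ _ branches letters stack; rfl
  | cons c rest ih =>
    intro i h1 hn branches letters stack
    by_cases hlast : i = n - 1
    · have : rest = [] := by
        have : rest.length = 0 := by simp only [List.length_cons] at hn; omega
        exact List.eq_nil_of_length_eq_zero this
      subst this
      simp only [loopB, if_pos (Or.inr hlast)]
      simp [runI]
    · have hcond : ¬(i = 0 ∨ i = n - 1) := by omega
      have hrne : rest ≠ [] := by
        intro h; subst h; simp at hn; omega
      have hdl : (c :: rest).dropLast = c :: rest.dropLast := by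
        rw [List.dropLast_cons_of_ne_nil hrne]
      rw [hdl]
      simp only [loopB, runI, if_neg hcond]
      by_cases hc : c = '('
      · simp only [if_pos hc]; exact ih (i+1) (by omega) (by simp only [List.length_cons] at hn; omega) _ _ _
      · simp only [if_neg hc]
        by_cases hc2 : c = ')'
        · simp only [if_pos hc2]
          cases stack.getLast? with
          | none => rfl
          | some m => exact ih (i+1) (by omega) (by simp only [List.length_cons] at hn; omega) _ _ _
        · simp only [if_neg hc2]
          by_cases hc3 : c = ','
          · simp only [if_pos hc3]; exact ih (i+1) (by omega) (by simp only [List.length_cons] at hn; omega) _ _ _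
          · simp only [if_neg hc3]; exact ih (i+1) (by omega) (by simp only [List.length_cons] at hn; omega) _ _ _

-- remainder returned by parseB is a suffix-length bound
theorem parseB_len : ∀ (f : Nat) (rest : List Char) (b : List (List String)) (l : List String),
    (parseB f rest b l).2.2.1.length ≤ rest.length := by
  intro f
  induction f with
  | zero => intro rest b l; simp [parseB]
  | succ f ih =>
    intro rest b l
    cases rest with
    | nil => simp [parseB]
    | cons c rest =>
      simp only [parseB]
      by_cases hc : c = '('
      · simp only [if_pos hc]
        calc (parseB f (parseB f rest [] []).2.2.1 _ _).2.2.1.length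
            ≤ (parseB f rest [] []).2.2.1.length := ih _ _ _
          _ ≤ rest.length := ih _ _ _
          _ ≤ (c :: rest).length := by simp
      · simp only [if_neg hc]
        by_cases hc2 : c = ')'
        · simp only [if_pos hc2]; simp
        · simp only [if_neg hc2]
          by_cases hc3 : c ≠ ','
          · simp only [if_pos hc3]
            calc (parseB f rest _ _).2.2.1.length ≤ rest.length := ih _ _ _
              _ ≤ (c :: rest).length := by simp
          · simp only [if_neg hc3]
            calc (parseB f rest _ _).2.2.1.length ≤ rest.length := ih _ _ _
              _ ≤ (c :: rest).length := by simp

-- parseB is independent of the fuel once fuel ≥ remaining length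
theorem parseB_fuel : ∀ (f1 f2 : Nat) (rest : List Char) (b : List (List String)) (l : List String),
    rest.length ≤ f1 → rest.length ≤ f2 → parseB f1 rest b l = parseB f2 rest b l := by
  intro f1
  induction f1 with
  | zero =>
    intro f2 rest b l h1 _
    have : rest = [] := List.eq_nil_of_length_eq_zero (by omega)
    subst this
    cases f2 <;> rfl
  | succ f ih =>
    intro f2 rest b l h1 h2
    cases rest with
    | nil => cases f2 <;> rfl
    | cons c rest =>
      cases f2 with
      | zero => simp at h2
      | succ f2 =>
        simp only [parseB]
        by_cases hc : c = '('
        · simp only [if_pos hc]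
          have hinner : parseB f rest [] [] = parseB f2 rest [] [] :=
            ih f2 rest [] [] (by simp at h1; omega) (by simp at h2; omega)
          rw [hinner]
          exact ih f2 _ _ _
            (le_trans (parseB_len f2 rest [] []) (by simp at h1; omega))
            (le_trans (parseB_len f2 rest [] []) (by simp at h2; omega))
        · simp only [if_neg hc]
          by_cases hc2 : c = ')'
          · simp only [if_pos hc2]
          · simp only [if_neg hc2]
            by_cases hc3 : c ≠ ','
            · simp only [if_pos hc3]
              exact ih f2 _ _ _ (by simp at h1; omega) (by simp at h2; omega)
            · simp only [if_neg hc3]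
              exact ih f2 _ _ _ (by simp at h1; omega) (by simp at h2; omega)

-- suspended recursion frames (innermost first): branch chunk × letter chunk
def flatBL : List (List (List String) × List String) → List (List String)
  | [] => []
  | g :: gs => flatBL gs ++ g.1

def flatLL : List (List (List String) × List String) → List String
  | [] => []
  | g :: gs => flatLL gs ++ g.2

def offsets : List (List (List String) × List String) → List Nat
  | [] => []
  | g :: gs => offsets gs ++ [(flatLL (g :: gs)).length]

-- resuming the suspended frames on a parse result
def resume : List (List (List String) × List String) →
    List (List String) × List String × List Char × Bool → List (List String)
  | [], r => r.1
  | g :: gs, (b, l, rest, cl) =>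
      resume gs (parseB rest.length rest (g.1 ++ b ++ (if cl then [l] else [])) (g.2 ++ l))

theorem resume_eof (fs : List (List (List String) × List String))
    (b : List (List String)) (l : List String) :
    resume fs (b, l, [], false) = flatBL fs ++ b := by
  induction fs generalizing b l with
  | nil => rfl
  | cons g gs ih =>
    show resume gs (parseB 0 [] (g.1 ++ b ++ []) (g.2 ++ l)) = _
    rw [show parseB 0 [] (g.1 ++ b ++ []) (g.2 ++ l) = (g.1 ++ b, g.2 ++ l, [], false) by
      simp [parseB]]
    rw [ih]
    simp [flatBL]

-- the stack machine runI is the recursive parser with its frames flattened out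
theorem runI_resume : ∀ (rest : List Char) (fs : List (List (List String) × List String))
    (b : List (List String)) (l : List String),
    runI rest (flatBL fs ++ b) (flatLL fs ++ l) (offsets fs) =
      resume fs (parseB rest.length rest b l) := by
  intro rest
  induction rest with
  | nil =>
    intro fs b l
    show flatBL fs ++ b = resume fs (parseB 0 [] b l)
    rw [show parseB 0 [] b l = (b, l, [], false) from rfl, resume_eof]
  | cons c rest ih =>
    intro fs b l
    simp only [List.length_cons, runI, parseB]
    by_cases hc : c = '('
    · simp only [if_pos hc]
      have key := ih ((b, l) :: fs) [] []
      simp only [flatBL, flatLL, offsets, List.append_nil] at key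
      rw [key]
      -- both sides are resume of the inner parse with the (b, l) frame pushed
      show resume ((b, l) :: fs) (parseB rest.length rest [] []) =
        resume fs (parseB rest.length
          (parseB rest.length rest [] []).2.2.1
          (b ++ (parseB rest.length rest [] []).1 ++
            (if (parseB rest.length rest [] []).2.2.2 then [(parseB rest.length rest [] []).2.1] else []))
          (l ++ (parseB rest.length rest [] []).2.1))
      rcases hr : parseB rest.length rest [] [] with ⟨ib, il, rest', cl⟩
      show resume fs (parseB rest'.length rest' (b ++ ib ++ (if cl then [il] else [])) (l ++ il)) =
        resume fs (parseB rest.length rest' (b ++ ib ++ (if cl then [il] else [])) (l ++ il))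
      have hlen : rest'.length ≤ rest.length := by
        have := parseB_len rest.length rest [] []
        rw [hr] at this
        exact this
      rw [parseB_fuel rest'.length rest.length rest' _ _ (le_refl _) hlen]
    · simp only [if_neg hc]
      by_cases hc2 : c = ')'
      · simp only [if_pos hc2]
        cases fs with
        | nil => rfl
        | cons g gs =>
          rw [show (offsets (g :: gs)).getLast? = some ((flatLL (g :: gs)).length) by
            simp [offsets]]
          show runI rest
              (flatBL (g :: gs) ++ b ++ [(flatLL (g :: gs) ++ l).drop ((flatLL (g :: gs)).length)])
              (flatLL (g :: gs) ++ l) ((offsets (g :: gs)).dropLast) =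
            resume (g :: gs) (b, l, rest, true)
          rw [show (offsets (g :: gs)).dropLast = offsets gs by simp [offsets],
            show (flatLL (g :: gs) ++ l).drop ((flatLL (g :: gs)).length) = l by simp]
          show _ = resume gs (parseB rest.length rest (g.1 ++ b ++ [l]) (g.2 ++ l))
          rw [← ih gs (g.1 ++ b ++ [l]) (g.2 ++ l)]
          simp [flatBL, flatLL]
      · simp only [if_neg hc2]
        by_cases hc3 : c = ','
        · have hne : ¬ (c ≠ ',') := by simp [hc3]
          simp only [if_pos hc3, if_neg hne]
          exact ih fs b l
        · have hne : c ≠ ',' := hc3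
          simp only [if_neg hc3, if_pos hne]
          have key := ih fs (b ++ [[String.ofList [c]]]) (l ++ [String.ofList [c]])
          rw [← key]
          simp

-- ===== VERDICT (by name: the statement is the Claim_ definition above) =====
theorem branchFinder_spec : Claim_equal_branchFinder := by
  intro s _ hpre
  unfold Spec_branchFinder branchFinder branchFinder_alt
  rw [main_lemma s.toList hpre s.toList 0 rfl [] [] [] [] 0 rfl (by simp [seg]) (by simp) (by simp)]
  cases hcs : s.toList with
  | nil => rfl
  | cons c cs =>
    have h1 : loopB (c :: cs).length (c :: cs) 0 [] [] [] = loopB (c :: cs).length cs 1 [] [] [] := by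
      simp [loopB]
    rw [h1, loopB_runI (c :: cs).length cs 1 (le_refl _) (by simp only [List.length_cons]; omega)]
    have key := runI_resume cs.dropLast [] [] []
    simp only [flatBL, flatLL, offsets, List.append_nil] at key
    rw [key]
    show resume [] _ = _
    have : ((c :: cs).drop 1).dropLast = cs.dropLast := by simp
    rw [this]
    rfl
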